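-- pv_equiv track=rewrite | github.com/Lagom92/TIL | Algorithm/BOJ/trophy_display.py | solution
-- ===== SOURCE A (Python) =====
-- def solution(n, trophy_list):
--     cnt = 1
--     maxV = trophy_list[0]
--     for i in range(1, n):
--         if trophy_list[i] > maxV:
--             cnt += 1
--         if maxV < trophy_list[i]:
--             maxV = trophy_list[i]
--     return cnt
-- ===== SOURCE B (Python) =====
-- def solution(n, trophy_list):
--     # Two-phase: build the prefix-maximum table, then count its strict increases.
--     pm = [trophy_list[0]]
--     for i in range(1, n):
--         pm.append(max(pm[-1], trophy_list[i]))
--     return 1 + sum(a < b for a, b in zip(pm, pm[1:]))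
-- ===== Notes on version B (the rewrite author's own statement) =====
-- stated objective: alternative
-- what changed: Replaces the single running-max-and-count loop with a two-phase shape: first materialise the prefix-maximum table, then count its strict increases in a separate zip pass.
import Mathlib
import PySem

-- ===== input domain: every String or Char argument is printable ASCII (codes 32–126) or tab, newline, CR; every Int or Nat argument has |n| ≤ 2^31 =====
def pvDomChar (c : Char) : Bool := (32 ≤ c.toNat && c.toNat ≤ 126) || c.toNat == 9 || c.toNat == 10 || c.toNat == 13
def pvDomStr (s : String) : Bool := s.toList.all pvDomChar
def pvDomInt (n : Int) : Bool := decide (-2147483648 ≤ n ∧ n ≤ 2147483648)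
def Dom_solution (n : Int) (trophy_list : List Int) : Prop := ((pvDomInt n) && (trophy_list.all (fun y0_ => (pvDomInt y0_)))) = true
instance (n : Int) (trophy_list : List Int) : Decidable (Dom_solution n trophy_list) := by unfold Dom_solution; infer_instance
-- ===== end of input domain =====

-- B builds the prefix-maximum table first, then counts its strict increases in a
-- second pass (same O(n) cost, different decomposition than A's fused loop).

-- ===== PORT A =====
def solution (n : Int) (trophy_list : List Int) : Int :=
  let s := (PySem.List.pyRange 1 n 1).foldl (fun (s : Int × Int) i =>
    let x := PySem.List.pyGetD trophy_list i 0
    let s1 := if x > s.2 then (s.1 + 1, s.2) else s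
    if s1.2 < x then (s1.1, x) else s1)
    (1, PySem.List.pyGetD trophy_list 0 0)
  s.1

-- ===== PORT B =====
def solution_alt (n : Int) (trophy_list : List Int) : Int :=
  let pm := (PySem.List.pyRange 1 n 1).foldl (fun (pm : List Int) i =>
    pm ++ [max (PySem.List.pyGetD pm (-1) 0) (PySem.List.pyGetD trophy_list i 0)])
    [PySem.List.pyGetD trophy_list 0 0]
  1 + ((pm.zip pm.tail).map (fun p => if p.1 < p.2 then (1 : Int) else 0)).sum

-- ===== PRECONDITION & SPEC =====
-- A raises IndexError exactly when the list is empty (trophy_list[0]) or n exceeds its length.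
def Pre_solution (n : Int) (trophy_list : List Int) : Prop :=
  trophy_list ≠ [] ∧ n ≤ (trophy_list.length : Int)
instance (n : Int) (trophy_list : List Int) : Decidable (Pre_solution n trophy_list) := by
  unfold Pre_solution; infer_instance
def pvWitness_solution : Int × List Int := (3, [1, 3, 2])

def Spec_solution (n : Int) (trophy_list : List Int) (out : Int) : Prop := out = solution_alt n trophy_list
instance (n : Int) (trophy_list : List Int) (out : Int) : Decidable (Spec_solution n trophy_list out) := by unfold Spec_solution; infer_instance

-- ===== CLAIM (what is proved, stated in full; the proofs are below) =====
def Claim_equal_solution : Prop := ∀ (n : Int) (trophy_list : List Int), Dom_solution n trophy_list → Pre_solution n trophy_list → Spec_solution n trophy_list (solution n trophy_list)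

-- ===== LEMMAS AND PROOFS =====

-- number of strict increases between adjacent entries
def pvRises (pm : List Int) : Int :=
  ((pm.zip pm.tail).map (fun p => if p.1 < p.2 then (1 : Int) else 0)).sum

theorem pvRises_append (pm : List Int) (h : pm ≠ []) (x : Int) :
    pvRises (pm ++ [x]) = pvRises pm + (if pm.getLast h < x then 1 else 0) := by
  induction pm with
  | nil => exact absurd rfl h
  | cons a rest ih =>
    cases rest with
    | nil => simp [pvRises]
    | cons b r =>
      have := ih (by simp)
      simp only [pvRises, List.cons_append, List.zip_cons_cons, List.tail_cons, List.map_cons,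
        List.sum_cons] at this ⊢
      rw [this]
      exact (add_assoc _ _ _).symm

theorem pvInv (l : List Int) (t : List Int) (pm0 : List Int) (h0 : pm0 ≠ []) (c0 : Int)
    (hc : c0 = 1 + pvRises pm0) :
    let fA := fun (s : Int × Int) i =>
      let x := PySem.List.pyGetD t i 0
      let s1 := if x > s.2 then (s.1 + 1, s.2) else s
      if s1.2 < x then (s1.1, x) else s1
    let fB := fun (pm : List Int) i =>
      pm ++ [max (PySem.List.pyGetD pm (-1) 0) (PySem.List.pyGetD t i 0)]
    ∃ (h' : l.foldl fB pm0 ≠ []),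
      l.foldl fA (c0, pm0.getLast h0) = (1 + pvRises (l.foldl fB pm0), (l.foldl fB pm0).getLast h') := by
  intro fA fB
  induction l generalizing pm0 c0 with
  | nil => exact ⟨h0, by simp [hc]⟩
  | cons i rest ih =>
    simp only [List.foldl_cons]
    have hne : pm0 ++ [max (PySem.List.pyGetD pm0 (-1) 0) (PySem.List.pyGetD t i 0)] ≠ [] := by simp
    have hlast : PySem.List.pyGetD pm0 (-1) 0 = pm0.getLast h0 :=
      PySem.List.pyGetD_neg_one pm0 0 h0
    set x := PySem.List.pyGetD t i 0 with hx
    set m := pm0.getLast h0 with hm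
    have hstep : fA (c0, m) i = (c0 + (if m < x then 1 else 0), max m x) := by
      show (let s1 := if x > m then (c0 + 1, m) else (c0, m);
            if s1.2 < x then (s1.1, x) else s1) = _
      by_cases hmx : m < x
      · simp [hmx, max_eq_right (le_of_lt hmx)]
      · simp [hmx, max_eq_left (le_of_not_gt hmx)]
    have hBstep : fB pm0 i = pm0 ++ [max m x] := by
      show pm0 ++ [max (PySem.List.pyGetD pm0 (-1) 0) x] = _
      rw [hlast]
    have hif : (if m < max m x then (1:Int) else 0) = (if m < x then 1 else 0) := by
      by_cases hmx : m < x
      · simp [hmx, max_eq_right hmx.le]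
      · simp [hmx, max_eq_left (le_of_not_gt hmx)]
    have hc' : c0 + (if m < x then 1 else 0) = 1 + pvRises (pm0 ++ [max m x]) := by
      rw [pvRises_append pm0 h0 (max m x), hif, hc]; ring
    obtain ⟨h2, hrec⟩ := ih (pm0 ++ [max m x]) (by simp) _ hc'
    have hg : (pm0 ++ [max m x]).getLast (by simp) = max m x := by simp
    rw [hg] at hrec
    have key : List.foldl fB (fB pm0 i) rest = List.foldl fB (pm0 ++ [max m x]) rest := by
      rw [hBstep]
    refine ⟨by rw [key]; exact h2, ?_⟩
    rw [hstep]
    simp only [key]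
    exact hrec

-- ===== VERDICT (by name: the statement is the Claim_ definition above) =====
theorem solution_spec : Claim_equal_solution := by
  intro n t _ _
  show solution n t = solution_alt n t
  unfold solution solution_alt
  obtain ⟨h', heq⟩ := pvInv (PySem.List.pyRange 1 n 1) t [PySem.List.pyGetD t 0 0] (by simp) 1
    (by simp [pvRises])
  simp only [List.getLast_singleton] at heq
  dsimp only
  rw [heq]
  rfl
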